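-- pv_equiv track=rewrite | github.com/VirtualAdam/blog-pipeline | pipeline/stage8_assemble.py | in_html_comment
-- ===== SOURCE A (Python) =====
-- def in_html_comment(lines: list, current_idx: int) -> bool:
--     """Check if we're currently inside an HTML comment block."""
--     in_comment = False
--     for i in range(current_idx + 1):
--         line = lines[i].strip()
--         if '<!--' in line and '-->' not in line:
--             in_comment = True
--         elif '-->' in line:
--             in_comment = False
--     return in_comment
-- ===== SOURCE B (Python) =====
-- def in_html_comment(lines: list, current_idx: int) -> bool:
--     """Check if we're currently inside an HTML comment block."""
--     for i in range(current_idx, -1, -1):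
--         line = lines[i].strip()
--         if '-->' in line:
--             return False
--         if '<!--' in line:
--             return True
--     return False
-- ===== Notes on version B (the rewrite author's own statement) =====
-- stated objective: simpler
-- what changed: Backward scan from current_idx with early return at the most recent comment marker, instead of folding a state flag forward over the whole prefix.
-- outside the precondition, e.g. on in_html_comment(['a'], 3): A raises IndexError, B raises IndexError
import Mathlib
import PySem

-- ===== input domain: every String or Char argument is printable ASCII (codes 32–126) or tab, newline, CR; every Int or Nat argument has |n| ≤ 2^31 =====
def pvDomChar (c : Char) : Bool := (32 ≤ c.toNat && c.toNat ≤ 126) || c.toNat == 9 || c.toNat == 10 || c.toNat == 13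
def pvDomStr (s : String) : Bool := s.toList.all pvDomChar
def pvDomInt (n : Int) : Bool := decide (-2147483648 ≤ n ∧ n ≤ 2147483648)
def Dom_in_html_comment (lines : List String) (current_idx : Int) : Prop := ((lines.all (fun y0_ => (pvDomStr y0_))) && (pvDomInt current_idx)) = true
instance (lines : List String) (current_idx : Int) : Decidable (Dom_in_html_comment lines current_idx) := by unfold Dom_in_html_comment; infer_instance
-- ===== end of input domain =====

-- ===== PORT A =====
-- Port note: lines[i] is ported as pyGetD with default ""; Pre_ restricts to indices where Python does not raise.
def in_html_comment (lines : List String) (current_idx : Int) : Bool :=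
  (PySem.List.pyRange 0 (current_idx + 1) 1).foldl
    (fun in_comment i =>
      let line := PySem.Str.strip (PySem.List.pyGetD lines i "")
      if PySem.Str.isIn "<!--" line && !(PySem.Str.isIn "-->" line) then true
      else if PySem.Str.isIn "-->" line then false
      else in_comment)
    false

-- ===== PORT B =====
-- backward scan: for i in range(current_idx, -1, -1), early return at the first marker
def scanBack (lines : List String) : Nat → Bool
  | 0 =>
    let line := PySem.Str.strip (PySem.List.pyGetD lines ((0 : Nat) : Int) "")
    if PySem.Str.isIn "-->" line then false
    else if PySem.Str.isIn "<!--" line then true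
    else false
  | Nat.succ j =>
    let line := PySem.Str.strip (PySem.List.pyGetD lines ((j + 1 : Nat) : Int) "")
    if PySem.Str.isIn "-->" line then false
    else if PySem.Str.isIn "<!--" line then true
    else scanBack lines j

def in_html_comment_alt (lines : List String) (current_idx : Int) : Bool :=
  if current_idx < 0 then false else scanBack lines current_idx.toNat

-- ===== PRECONDITION & SPEC =====
-- Pre_ excludes exactly the inputs where Python A raises IndexError: current_idx ≥ len(lines); both A and B raise there.
def Pre_in_html_comment (lines : List String) (current_idx : Int) : Prop :=
  current_idx < (lines.length : Int)
instance (lines : List String) (current_idx : Int) : Decidable (Pre_in_html_comment lines current_idx) := by unfold Pre_in_html_comment; infer_instance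
def pvWitness_in_html_comment : List String × Int := (["<!-- a", "b"], 1)

def Spec_in_html_comment (lines : List String) (current_idx : Int) (out : Bool) : Prop := out = in_html_comment_alt lines current_idx
instance (lines : List String) (current_idx : Int) (out : Bool) : Decidable (Spec_in_html_comment lines current_idx out) := by unfold Spec_in_html_comment; infer_instance

-- ===== CLAIM (what is proved, stated in full; the proofs are below) =====
def Claim_equal_in_html_comment : Prop := ∀ (lines : List String) (current_idx : Int), Dom_in_html_comment lines current_idx → Pre_in_html_comment lines current_idx → Spec_in_html_comment lines current_idx (in_html_comment lines current_idx)

-- ===== LEMMAS AND PROOFS =====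

-- A's per-line update and B's per-line test decide the same value (marker order: '-->' wins)
theorem step_comm (A B s : Bool) :
    (if A && !B then true else if B then false else s) =
    (if B then false else if A then true else s) := by
  cases A <;> cases B <;> cases s <;> rfl

-- the key lemma: the forward fold over range(0, n+1) equals the backward early-exit scan from n
theorem foldl_eq_scanBack (lines : List String) : ∀ (n : Nat),
    (PySem.List.pyRange 0 ((n : Int) + 1) 1).foldl
      (fun in_comment i =>
        let line := PySem.Str.strip (PySem.List.pyGetD lines i "")
        if PySem.Str.isIn "<!--" line && !(PySem.Str.isIn "-->" line) then true
        else if PySem.Str.isIn "-->" line then false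
        else in_comment)
      false = scanBack lines n := by
  intro n
  induction n with
  | zero =>
    have hc : (((0 : Nat) : Int) + 1) = (0 : Int) + 1 := by norm_num
    rw [hc, PySem.List.pyRange_one_singleton]
    simp only [List.foldl, scanBack, Nat.cast_zero]
    exact step_comm _ _ _
  | succ n ih =>
    have hc : ((↑(n + 1) : Int) + 1) = ((n : Int) + 1) + 1 := by push_cast; ring
    have hi : ((n : Int) + 1) = ((n + 1 : Nat) : Int) := by push_cast; ring
    rw [hc, PySem.List.pyRange_one_succ_right (by positivity), List.foldl_append, ih, hi]
    simp only [List.foldl, scanBack]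
    exact step_comm _ _ _

-- ===== VERDICT (by name: the statement is the Claim_ definition above) =====
theorem in_html_comment_spec : Claim_equal_in_html_comment := by
  intro lines current_idx _ _
  unfold Spec_in_html_comment in_html_comment in_html_comment_alt
  by_cases hneg : current_idx < 0
  · rw [if_pos hneg, PySem.List.pyRange_one_eq_nil (by omega)]
    rfl
  · rw [if_neg hneg]
    have h2 := foldl_eq_scanBack lines current_idx.toNat
    rw [show ((current_idx.toNat : Nat) : Int) = current_idx by omega] at h2
    exact h2
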